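-- pv_equiv track=rewrite | github.com/KrishShah3011/DAA-LAB | LAB 4/DAA LAB 4.py | integer_mul
-- ===== SOURCE A (Python) =====
-- def integer_mul(a, b):
--     """
--     Multiply two integers using a manual approach by creating
--     a dictionary of multiples for the larger integer and
--     summing results for the digits of the smaller integer.
--
--     Args:
--         a (int): First integer.
--         b (int): Second integer.
--
--     Returns:
--         int: The result of multiplying a and b.
--         str: "Invalid Datatype" if inputs are not integers.
--     """
--     if isinstance(a, int) and isinstance(b, int):
--         x = min(a, b)
--         y = max(a, b)
--         ans_dict = {}
--
--         for i in range(10):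
--             ans_dict[i] = y * i
--
--         ans = 0
--         count = 0
--
--         for i in reversed(str(x)):
--             zeros = "0" * count
--             ans += int(str(ans_dict[int(i)]) + zeros)
--             count += 1
--
--         return ans
--     else:
--         return "Invalid Datatype"
-- ===== SOURCE B (Python) =====
-- def integer_mul(a, b):
--     """Multiply two integers by positional (Horner) accumulation over the
--     digits of the smaller one; no table of multiples, no string splicing."""
--     if isinstance(a, int) and isinstance(b, int):
--         x = min(a, b)
--         y = max(a, b)
--         r = 0
--         for ch in str(x):
--             r = r * 10 + y * int(ch)
--         return r
--     else:
--         return "Invalid Datatype"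
-- ===== Notes on version B (the rewrite author's own statement) =====
-- stated objective: simpler
-- what changed: Replaces the precomputed 0-9 multiples dict plus reversed iteration with decimal string concatenation and re-parsing by a single forward Horner accumulation r = r*10 + y*int(ch) over the digits of the smaller factor.
import Mathlib
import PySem

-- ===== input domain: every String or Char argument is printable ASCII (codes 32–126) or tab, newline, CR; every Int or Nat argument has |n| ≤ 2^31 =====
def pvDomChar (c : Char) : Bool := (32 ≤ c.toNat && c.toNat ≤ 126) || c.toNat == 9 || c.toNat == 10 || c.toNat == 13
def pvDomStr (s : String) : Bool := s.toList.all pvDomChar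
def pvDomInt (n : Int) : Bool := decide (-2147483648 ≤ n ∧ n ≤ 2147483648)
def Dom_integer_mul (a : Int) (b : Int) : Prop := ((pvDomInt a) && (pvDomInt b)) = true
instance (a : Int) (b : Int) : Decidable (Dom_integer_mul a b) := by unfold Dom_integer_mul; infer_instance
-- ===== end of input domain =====

-- B computes the same product by a single forward Horner pass over the digits of the
-- smaller factor ("simpler"): no dict of multiples, no string concatenation/re-parsing.

-- ===== PORT A =====
-- literal port of A: dict of multiples 0..9 of y = max(a,b), then for each digit of
-- str(min(a,b)) in reverse, ans += int(str(ans_dict[int(ch)]) + "0"*count); count += 1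
def integer_mul (a : Int) (b : Int) : Int :=
  let x := min a b
  let y := max a b
  let ansDict := (PySem.List.pyRange 0 10 1).foldl
    (fun (d : PySem.Dict Int Int) i => d.insert i (y * i)) PySem.Dict.empty
  let st := ((PySem.Int.toChars x).reverse).foldl
    (fun (st : Int × Int) i =>
      let zeros : List Char := List.replicate st.2.toNat '0'
      let key := (PySem.Int.ofChars? [i]).getD 0        -- int(i); Pre_ excludes the ValueError case
      let q := (PySem.Dict.get? ansDict key).getD 0     -- ans_dict[int(i)] (key always present)
      (st.1 + (PySem.Int.ofChars? (PySem.Int.toChars q ++ zeros)).getD 0, st.2 + 1))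
    (0, 0)
  st.1

-- ===== PORT B =====
-- literal port of Source B: r = 0; for ch in str(min(a,b)): r = r*10 + max(a,b)*int(ch)
def integer_mul_alt (a : Int) (b : Int) : Int :=
  let x := min a b
  let y := max a b
  (PySem.Int.toChars x).foldl
    (fun r c => r * 10 + y * (PySem.Int.ofChars? [c]).getD 0) 0

-- ===== PRECONDITION & SPEC =====
-- Pre_ excludes exactly the inputs where the Python raises: if min(a,b) < 0, iterating
-- over str(min) feeds the '-' sign to int(), a ValueError (in A and in B alike).
def Pre_integer_mul (a : Int) (b : Int) : Prop := 0 ≤ a ∧ 0 ≤ b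
instance (a : Int) (b : Int) : Decidable (Pre_integer_mul a b) := by unfold Pre_integer_mul; infer_instance
def pvWitness_integer_mul : Int × Int := (3, 4)

def Spec_integer_mul (a : Int) (b : Int) (out : Int) : Prop := out = integer_mul_alt a b
instance (a : Int) (b : Int) (out : Int) : Decidable (Spec_integer_mul a b out) := by unfold Spec_integer_mul; infer_instance

-- ===== CLAIM (what is proved, stated in full; the proofs are below) =====
def Claim_equal_integer_mul : Prop := ∀ (a : Int) (b : Int), Dom_integer_mul a b → Pre_integer_mul a b → Spec_integer_mul a b (integer_mul a b)

-- ===== LEMMAS AND PROOFS =====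

-- decimal digit characters of n (most significant first); equals Nat.toDigits 10 n
def decChars (n : Nat) : List Char :=
  if _h : n < 10 then [Nat.digitChar n]
  else decChars (n / 10) ++ [Nat.digitChar (n % 10)]
decreasing_by exact Nat.div_lt_self (by omega) (by omega)

theorem digitChar_isDigit (k : Nat) (h : k < 10) : (Nat.digitChar k).isDigit = true := by
  interval_cases k <;> decide

theorem digitChar_val (k : Nat) (h : k < 10) : (Nat.digitChar k).toNat - '0'.toNat = k := by
  interval_cases k <;> decide

theorem digitChar_val48 (k : Nat) (h : k < 10) : (Nat.digitChar k).toNat - 48 = k := by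
  interval_cases k <;> decide

theorem decChars_digits (n : Nat) : ∀ c ∈ decChars n, c.isDigit = true := by
  induction n using Nat.strong_induction_on with
  | _ n ih =>
    rw [decChars]
    split
    · intro c hc; simp at hc; subst hc; exact digitChar_isDigit _ (by omega)
    · intro c hc
      rcases List.mem_append.mp hc with h1 | h2
      · exact ih (n / 10) (Nat.div_lt_self (by omega) (by omega)) c h1
      · simp at h2; subst h2; exact digitChar_isDigit _ (by omega)

theorem decChars_ne_nil (n : Nat) : decChars n ≠ [] := by
  rw [decChars]; split <;> simp

theorem toDigitsCore_eq (fuel : Nat) : ∀ n ds, n < fuel →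
    Nat.toDigitsCore 10 fuel n ds = decChars n ++ ds := by
  induction fuel with
  | zero => intro n ds h; omega
  | succ fuel ih =>
    intro n ds h
    rw [Nat.toDigitsCore]
    by_cases h10 : n / 10 = 0
    · rw [if_pos h10, decChars, dif_pos (by omega)]
      have hmod : n % 10 = n := Nat.mod_eq_of_lt (by omega)
      rw [hmod]
      rfl
    · rw [if_neg h10]
      have hn10 : 10 ≤ n := by omega
      have hlt : n / 10 < fuel := by
        have := Nat.div_lt_self (show 0 < n by omega) (show 1 < 10 by norm_num)
        omega
      rw [ih (n / 10) _ hlt]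
      conv_rhs => rw [decChars]
      rw [dif_neg (by omega)]
      simp

theorem toDigits_eq (n : Nat) : Nat.toDigits 10 n = decChars n := by
  have := toDigitsCore_eq (n + 1) n [] (by omega)
  simpa [Nat.toDigits] using this

theorem toChars_nonneg (q : Int) (h : 0 ≤ q) :
    PySem.Int.toChars q = decChars q.toNat := by
  rw [PySem.Int.toChars, if_neg (by omega), toDigits_eq]

-- strip / whnf infrastructure for ofChars? on all-digit lists
theorem isIntSpace_digit (d : Char) (hd : d.isDigit = true) :
    PySem.Int.isIntSpace d = false := by
  simp [Char.isDigit, UInt32.le_iff_toNat_le] at hd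
  simp [PySem.Int.isIntSpace, Char.ext_iff, UInt32.ext_iff]
  omega

theorem dropWhile_space_of_digits (l : List Char) (h : ∀ c ∈ l, c.isDigit = true) :
    List.dropWhile PySem.Int.isIntSpace l = l := by
  cases l with
  | nil => simp
  | cons c cs => simp [List.dropWhile, isIntSpace_digit c (h c (by simp))]

theorem strip_of_digits (l : List Char) (h : ∀ c ∈ l, c.isDigit = true) :
    (List.dropWhile PySem.Int.isIntSpace
      (List.dropWhile PySem.Int.isIntSpace l).reverse).reverse = l := by
  rw [dropWhile_space_of_digits _ h]
  rw [dropWhile_space_of_digits _ (by intro c hc; exact h c (List.mem_reverse.mp hc))]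
  simp

-- wrapper eliminator used to reach the private digit-parsing helper of ofChars?
theorem optW (X : Option Nat) (H : Nat) (h : X = some H) :
    Option.map (fun n : Int => n) (X.bind fun a => some ((a : Nat) : Int)) = some ((H : Nat) : Int) := by
  subst h; rfl

-- the master evaluation: int() on a nonempty all-digit string is its Horner value
theorem ofChars?_digits (d : Char) (t : List Char) (h : ∀ c ∈ d :: t, c.isDigit = true) :
    PySem.Int.ofChars? (d :: t) =
      some ((((d :: t).foldl (fun a c => a * 10 + (c.toNat - '0'.toNat)) 0 : Nat) : Int)) := by
  have hd : d.isDigit = true := h d (by simp)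
  have ht : ∀ c ∈ t, c.isDigit = true := by intro c hc; exact h c (by simp [hc])
  unfold PySem.Int.ofChars?
  rw [strip_of_digits _ h]
  conv_lhs => whnf
  split
  · rename_i heq
    exfalso; rw [List.cons.injEq] at heq; rw [heq.1] at hd; simp at hd
  · rename_i heq
    exfalso; rw [List.cons.injEq] at heq; rw [heq.1] at hd; simp at hd
  · rename_i hn1 hn2
    clear hn1 hn2
    simp only [Option.bind_eq_bind, Option.pure_def]
    apply optW
    conv_lhs => whnf
    rw [hd]
    conv_lhs => whnf
    simp only [List.foldl_cons]
    generalize 0 * 10 + (d.toNat - '0'.toNat) = A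
    clear hd h
    revert ht
    induction t generalizing A with
    | nil =>
      intro _
      conv_lhs => whnf
      rfl
    | cons c t ihc =>
      intro htc
      have hc : c.isDigit = true := htc c (by simp)
      conv_lhs => whnf
      rw [hc]
      conv_lhs => whnf
      rw [List.foldl_cons]
      exact ihc _ (by intro x hx; exact htc x (by simp [hx]))

theorem ofChars?_single (c : Char) (hc : c.isDigit = true) :
    PySem.Int.ofChars? [c] = some (((c.toNat - '0'.toNat : Nat) : Int)) := by
  have := ofChars?_digits c [] (by intro x hx; simp at hx; subst hx; exact hc)
  simpa using this

-- Horner value of decChars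
theorem horner_decChars (n : Nat) : ∀ (a : Nat),
    (decChars n).foldl (fun a c => a * 10 + (c.toNat - '0'.toNat)) a
      = a * 10 ^ (decChars n).length + n := by
  induction n using Nat.strong_induction_on with
  | _ n ih =>
    intro a
    rw [decChars]
    split
    · rename_i h; simp [digitChar_val48 n h]
    · rename_i h
      rw [List.foldl_append, ih (n / 10) (Nat.div_lt_self (by omega) (by omega)) a]
      simp only [List.foldl_cons, List.foldl_nil, List.length_append, List.length_cons,
        List.length_nil, digitChar_val (n % 10) (by omega)]
      rw [pow_succ, ← mul_assoc]
      generalize a * 10 ^ (decChars (n / 10)).length = A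
      omega

theorem horner_zeros (k : Nat) (a : Nat) :
    (List.replicate k '0').foldl (fun a c => a * 10 + (c.toNat - '0'.toNat)) a = a * 10 ^ k := by
  induction k generalizing a with
  | zero => simp
  | succ k ih =>
    rw [List.replicate_succ, List.foldl_cons, ih]
    have h0 : a * 10 + ('0'.toNat - '0'.toNat) = a * 10 := by omega
    rw [h0, pow_succ]
    ring

-- int(str(q) + "0"*k) = q * 10^k  for q ≥ 0
theorem ofChars?_shift (q : Int) (hq : 0 ≤ q) (k : Nat) :
    PySem.Int.ofChars? (PySem.Int.toChars q ++ List.replicate k '0') = some (q * 10 ^ k) := by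
  rw [toChars_nonneg q hq]
  obtain ⟨d, t, ht⟩ : ∃ d t, decChars q.toNat = d :: t := by
    cases hL : decChars q.toNat with
    | nil => exact absurd hL (decChars_ne_nil _)
    | cons d t => exact ⟨d, t, rfl⟩
  have hdig : ∀ c ∈ d :: t ++ List.replicate k '0', c.isDigit = true := by
    intro c hc
    rcases List.mem_cons.mp hc with h1 | h2
    · subst h1; exact decChars_digits q.toNat c (by rw [ht]; simp)
    · rcases List.mem_append.mp h2 with h3 | h4
      · exact decChars_digits q.toNat c (by rw [ht]; simp [h3])
      · rw [List.eq_of_mem_replicate h4]; decide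
  rw [ht, List.cons_append]
  rw [ofChars?_digits d (t ++ List.replicate k '0') hdig]
  have hfold : (d :: (t ++ List.replicate k '0')).foldl
      (fun a c => a * 10 + (c.toNat - '0'.toNat)) 0 = q.toNat * 10 ^ k := by
    rw [← List.cons_append, List.foldl_append, ← ht, horner_decChars q.toNat 0, horner_zeros]
    simp
  rw [hfold]
  push_cast
  rw [Int.toNat_of_nonneg hq]

-- ===== B side =====
theorem alt_eval (y : Int) (_hy : 0 ≤ y) (m : Nat) : ∀ (r : Int),
    (decChars m).foldl (fun r c => r * 10 + y * (PySem.Int.ofChars? [c]).getD 0) r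
      = r * 10 ^ (decChars m).length + y * m := by
  induction m using Nat.strong_induction_on with
  | _ m ih =>
    intro r
    rw [decChars]
    split
    · rename_i h
      rw [List.foldl_cons, List.foldl_nil, ofChars?_single _ (digitChar_isDigit m h)]
      simp only [Option.getD_some, List.length_cons, List.length_nil, digitChar_val m h,
        pow_one, zero_add]
    · rename_i h
      rw [List.foldl_append, ih (m / 10) (Nat.div_lt_self (by omega) (by omega)) r,
        List.foldl_cons, List.foldl_nil, ofChars?_single _ (digitChar_isDigit (m % 10) (by omega))]
      simp only [Option.getD_some, List.length_append, List.length_cons, List.length_nil,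
        digitChar_val (m % 10) (by omega)]
      rw [pow_succ]
      have hm : (m : Int) = ((m / 10 : Nat) : Int) * 10 + ((m % 10 : Nat) : Int) := by
        push_cast; omega
      conv_rhs => rw [hm]
      ring

-- ===== A side =====
-- the dict of multiples
theorem dict_lookup (y : Int) (d : Int) (h0 : 0 ≤ d) (h9 : d ≤ 9) :
    ((PySem.Dict.get? ((PySem.List.pyRange 0 10 1).foldl
        (fun (dd : PySem.Dict Int Int) i => dd.insert i (y * i)) PySem.Dict.empty) d)).getD 0
      = y * d := by
  have hr : PySem.List.pyRange 0 10 1 = [0, 1, 2, 3, 4, 5, 6, 7, 8, 9] := by decide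
  rw [hr]
  simp only [List.foldl_cons, List.foldl_nil]
  interval_cases d <;>
    simp [PySem.Dict.get?_insert]

-- little-endian value of a digit list
def vLE : List Char → Int
  | [] => 0
  | c :: r => ((c.toNat - '0'.toNat : Nat) : Int) + 10 * vLE r

theorem vLE_decChars_reverse (m : Nat) : vLE ((decChars m).reverse) = (m : Int) := by
  induction m using Nat.strong_induction_on with
  | _ m ih =>
    rw [decChars]
    split
    · rename_i h; simp [vLE, digitChar_val48 m h]
    · rename_i h
      rw [List.reverse_append]
      simp only [List.reverse_singleton, List.singleton_append, vLE]
      rw [ih (m / 10) (Nat.div_lt_self (by omega) (by omega))]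
      rw [digitChar_val (m % 10) (by omega)]
      push_cast
      omega

theorem a_fold (y : Int) (hy : 0 ≤ y) (R : List Char) (hR : ∀ c ∈ R, c.isDigit = true) :
    ∀ (s k : Int), 0 ≤ k →
    (R.foldl (fun (st : Int × Int) i =>
        (st.1 + (PySem.Int.ofChars? (PySem.Int.toChars
            ((PySem.Dict.get? ((PySem.List.pyRange 0 10 1).foldl
              (fun (dd : PySem.Dict Int Int) i => dd.insert i (y * i)) PySem.Dict.empty)
              ((PySem.Int.ofChars? [i]).getD 0)).getD 0)
            ++ List.replicate st.2.toNat '0')).getD 0, st.2 + 1))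
      (s, k)).1 = s + y * 10 ^ k.toNat * vLE R := by
  induction R with
  | nil => intro s k hk; simp [vLE]
  | cons c R ihR =>
    intro s k hk
    have hc : c.isDigit = true := hR c (by simp)
    have hcb : 48 ≤ c.toNat ∧ c.toNat ≤ 57 := by
      simp [Char.isDigit, UInt32.le_iff_toNat_le] at hc
      exact hc
    have h48 : '0'.toNat = 48 := rfl
    have hval9 : c.toNat - '0'.toNat ≤ 9 := by omega
    rw [List.foldl_cons]
    simp only [ofChars?_single c hc, Option.getD_some]
    rw [dict_lookup y _ (Int.natCast_nonneg _) (by exact_mod_cast hval9)]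
    rw [ofChars?_shift _ (mul_nonneg hy (Int.natCast_nonneg _)) k.toNat]
    simp only [Option.getD_some]
    rw [ihR (by intro x hx; exact hR x (by simp [hx])) _ (k + 1) (by omega)]
    have hk1 : (k + 1).toNat = k.toNat + 1 := by omega
    rw [hk1, vLE]
    ring

-- ===== main =====
theorem both_eval (a b : Int) (ha : 0 ≤ a) (hb : 0 ≤ b) :
    integer_mul a b = max a b * min a b ∧ integer_mul_alt a b = max a b * min a b := by
  have hx : (0 : Int) ≤ min a b := le_min ha hb
  have hy : (0 : Int) ≤ max a b := le_trans hx (min_le_max)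
  constructor
  · simp only [integer_mul]
    rw [toChars_nonneg _ hx]
    rw [a_fold (max a b) hy _
        (by intro c hcm; exact decChars_digits _ c (List.mem_reverse.mp hcm)) 0 0 le_rfl]
    rw [vLE_decChars_reverse]
    simp [Int.toNat_of_nonneg hx]
  · simp only [integer_mul_alt]
    rw [toChars_nonneg _ hx]
    rw [alt_eval (max a b) hy (min a b).toNat 0]
    simp [Int.toNat_of_nonneg hx]

-- ===== VERDICT (by name: the statement is the Claim_ definition above) =====
theorem integer_mul_spec : Claim_equal_integer_mul := by
  intro a b _hdom hpre
  obtain ⟨ha, hb⟩ := hpre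
  unfold Spec_integer_mul
  obtain ⟨h1, h2⟩ := both_eval a b ha hb
  rw [h1, h2]
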